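-- pv_equiv track=rewrite | github.com/Wertok07/phyton_bootcamp | 18112021_Dzien11/zad_2.py | wicej_niz
-- ===== SOURCE A (Python) =====
-- def wicej_niz(text, li):
--     slo = dict()
--     ss = set()
--     text = text.replace(" ", "")
--     for litera in text:
--         litera = litera.lower()
--         slo.setdefault(litera, 0)
--         slo[litera] += 1
--     for k, val in slo.items():
--         if val >= li:
--             ss.add(k)
--     return ss
-- ===== SOURCE B (Python) =====
-- def wicej_niz(text, li):
--     # Divide-and-conquer by letter class: peel off the first letter, split the
--     # remainder into "same letter" / "others", decide from the split sizes,
--     # recurse on the others.  No dict and no per-letter counting rescan.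
--     t = text.replace(" ", "").lower()
--
--     def go(chars):
--         if not chars:
--             return []
--         c = chars[0]
--         rest = [x for x in chars[1:] if x != c]
--         k = len(chars) - len(rest)
--         tail = go(rest)
--         return [c] + tail if li <= k else tail
--
--     return set(go(list(t)))
-- ===== Notes on version B (the rewrite author's own statement) =====
-- stated objective: alternative
-- what changed: Replaces A's dict-accumulating counting pass with a divide-and-conquer recursion that repeatedly peels off the first letter's whole class (partition into same/others), decides membership from the split sizes, and recurses on the remaining letters - no dict and no counter is ever built.
import Mathlib
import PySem

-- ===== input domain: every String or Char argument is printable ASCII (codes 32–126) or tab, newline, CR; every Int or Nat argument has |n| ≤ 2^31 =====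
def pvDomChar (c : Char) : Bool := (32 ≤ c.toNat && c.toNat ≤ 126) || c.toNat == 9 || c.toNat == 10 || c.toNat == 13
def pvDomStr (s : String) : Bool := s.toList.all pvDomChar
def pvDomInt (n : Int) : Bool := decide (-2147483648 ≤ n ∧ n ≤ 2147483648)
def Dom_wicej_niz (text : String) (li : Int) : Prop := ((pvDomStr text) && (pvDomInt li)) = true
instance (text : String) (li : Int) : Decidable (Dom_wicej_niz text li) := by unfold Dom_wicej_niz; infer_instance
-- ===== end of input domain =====

-- B replaces A's dict-accumulating counting loop by a divide-and-conquer recursion that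
-- peels off one letter class at a time (split into same/others, decide from the split
-- sizes, recurse on the others) — an alternative decomposition, not faster.

-- ===== PORT A =====
def wicej_niz (text : String) (li : Int) : List String :=
  let t := PySem.Str.replace text " " ""
  let slo := t.toList.foldl (fun (d : PySem.Dict String Int) ch =>
      let litera := PySem.Str.lower (String.ofList [ch])
      let d := d.setdefault litera 0
      d.insert litera (d.getD litera 0 + 1)) PySem.Dict.empty
  slo.items.foldl (fun (ss : PySem.Set String) kv =>
      if li ≤ kv.2 then PySem.Set.add ss kv.1 else ss) PySem.Set.empty

-- ===== PORT B =====
-- Source B's inner 'go': peel the first letter c, drop all its other occurrences,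
-- keep c iff the class size reaches li, recurse on the remaining letters.
def pvGo (li : Int) : List String → List String
  | [] => []
  | c :: cs =>
      let rest := cs.filter (fun x => !(x == c))
      let k : Int := ((cs.length + 1 : Int)) - rest.length
      let tail := pvGo li rest
      if li ≤ k then c :: tail else tail
termination_by l => l.length
decreasing_by
  simp only [List.length_unattach, List.length_cons]
  exact Nat.lt_succ_of_le (le_trans (List.length_filter_le _ _) (by simp))

def wicej_niz_alt (text : String) (li : Int) : List String :=
  let t := PySem.Str.lower (PySem.Str.replace text " " "")
  PySem.Set.ofList (pvGo li (t.toList.map (fun ch => String.ofList [ch])))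

-- ===== PRECONDITION & SPEC =====
def Spec_wicej_niz (text : String) (li : Int) (out : List String) : Prop := out = wicej_niz_alt text li
instance (text : String) (li : Int) (out : List String) : Decidable (Spec_wicej_niz text li out) := by unfold Spec_wicej_niz; infer_instance

-- ===== CLAIM (what is proved, stated in full; the proofs are below) =====
def Claim_equal_wicej_niz : Prop := ∀ (text : String) (li : Int), Dom_wicej_niz text li → Spec_wicej_niz text li (wicej_niz text li)

-- ===== LEMMAS AND PROOFS =====

-- A's per-char 'setdefault(k, 0); d[k] += 1' is exactly one Counter step
lemma setdefault_insert_eq_modify (d : PySem.Dict String Int) (k : String) :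
    ((d.setdefault k 0).insert k ((d.setdefault k 0).getD k 0 + 1)) = d.modify k 0 (· + 1) := by
  by_cases h : d.contains k = true
  · rw [PySem.Dict.setdefault_of_contains d 0 h]; rfl
  · rw [PySem.Dict.setdefault_of_not_contains d 0 (by simpa using h)]
    simp [PySem.Dict.modify, PySem.Dict.getD_insert_self, PySem.Dict.insert_insert_self,
      PySem.Dict.getD_of_not_contains d (0:Int) (by simpa using h)]

-- set() (first-occurrence dedup) commutes with filtering
lemma ofList_filter {α : Type} [BEq α] [LawfulBEq α] (p : α → Bool) (xs : List α) :
    PySem.Set.ofList (xs.filter p) = (PySem.Set.ofList xs).filter p := by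
  induction xs with
  | nil => rfl
  | cons x xs ih =>
    cases hp : p x with
    | true =>
      rw [List.filter_cons_of_pos hp, PySem.Set.ofList_cons, PySem.Set.ofList_cons, ih,
        List.filter_cons_of_pos hp]
      simp only [PySem.Set.discard, List.filter_filter]
      exact congrArg _ (List.filter_congr (fun a _ => Bool.and_comm _ _))
    | false =>
      rw [List.filter_cons_of_neg (by simp [hp]), ih, PySem.Set.ofList_cons,
        List.filter_cons_of_neg (by simp [hp])]
      simp only [PySem.Set.discard, List.filter_filter]
      refine List.filter_congr (fun a _ => ?_)
      cases hax : a == x with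
      | true => simp [eq_of_beq hax, hp]
      | false => simp

-- adding under a test over a nodup list of fresh elements appends the filtered list
lemma foldl_add_if_of_nodup {α : Type} [BEq α] [LawfulBEq α] (p : α → Prop) [DecidablePred p]
    (l : List α) (s : PySem.Set α) (hnd : l.Nodup) (hfresh : ∀ x ∈ l, PySem.Set.contains s x = false) :
    l.foldl (fun ss k => if p k then PySem.Set.add ss k else ss) s
      = s ++ l.filter (fun k => decide (p k)) := by
  induction l generalizing s with
  | nil => simp
  | cons x xs ih =>
    have hx : PySem.Set.contains s x = false := hfresh x (by simp)
    have hnd' : xs.Nodup := hnd.of_cons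
    by_cases hp : p x
    · have hx' : x ∉ s := by simpa [PySem.Set.contains] using hx
      have hadd : PySem.Set.add s x = s ++ [x] := by
        simp [PySem.Set.add, PySem.Set.contains, hx']
      have hfresh' : ∀ y ∈ xs, PySem.Set.contains (s ++ [x]) y = false := by
        intro y hy
        have h1 : y ∉ s := by
          simpa [PySem.Set.contains] using hfresh y (List.mem_cons_of_mem _ hy)
        have h2 : y ≠ x := fun h => (List.nodup_cons.mp hnd).1 (h ▸ hy)
        simp [PySem.Set.contains, h1, h2]
      rw [List.foldl_cons, if_pos hp, hadd, ih (s ++ [x]) hnd' hfresh',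
        List.filter_cons_of_pos (by simpa using hp)]
      simp
    · rw [List.foldl_cons, if_neg hp,
        ih s hnd' (fun y hy => hfresh y (List.mem_cons_of_mem _ hy)),
        List.filter_cons_of_neg (by simpa using hp)]

-- B's recursion computes: distinct letters in first-occurrence order whose count reaches li
lemma pvGo_eq_aux (li : Int) (n : Nat) : ∀ (l : List String), l.length ≤ n →
    pvGo li l = (PySem.Set.ofList l).filter (fun c => decide (li ≤ (l.count c : Int))) := by
  induction n with
  | zero =>
    intro l hl
    have : l = [] := List.eq_nil_of_length_eq_zero (Nat.le_zero.mp hl)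
    subst this
    rw [pvGo]; rfl
  | succ n ih =>
    intro l hl
    match l with
    | [] => rw [pvGo]; rfl
    | c :: cs =>
      rw [pvGo]
      have hrl : (cs.filter (fun x => !(x == c))).length ≤ n := by
        have := List.length_filter_le (fun x => !(x == c)) cs
        simp only [List.length_cons] at hl
        omega
      have ihr := ih (cs.filter (fun x => !(x == c))) hrl
      -- the class size k is the count of c in c :: cs
      have hcount : ((cs.length + 1 : Int)) - (cs.filter (fun x => !(x == c))).length
          = ((c :: cs).count c : Int) := by
        have h1 : (cs.filter (fun x => !(x == c))).length + cs.count c = cs.length := by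
          rw [← List.countP_eq_length_filter, List.count_eq_countP]
          simpa using (List.length_eq_countP_add_countP (fun x => !(x == c)) (l := cs)).symm
        have h3 : (c :: cs).count c = cs.count c + 1 := by simp
        rw [h3]; omega
      rw [hcount, ihr]
      -- counts over rest agree with counts over c :: cs on every remaining letter
      have hsame : (PySem.Set.ofList (cs.filter (fun x => !(x == c)))).filter
            (fun d => decide (li ≤ ((cs.filter (fun x => !(x == c))).count d : Int)))
          = ((PySem.Set.ofList cs).discard c).filter
            (fun d => decide (li ≤ ((c :: cs).count d : Int))) := by
        rw [ofList_filter]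
        show ((PySem.Set.ofList cs).filter _).filter _ = _
        simp only [PySem.Set.discard, List.filter_filter]
        refine List.filter_congr (fun d _ => ?_)
        cases hdc : d == c with
        | true => simp
        | false =>
          have hne : d ≠ c := by simpa using hdc
          have hc1 : (cs.filter (fun x => !(x == c))).count d = cs.count d := by
            rw [List.count_filter (by simp [hdc])]
          have hc2 : (c :: cs).count d = cs.count d := by
            have hne' : ¬ c = d := fun h => hne h.symm
            simp [hne']
          rw [hc1, hc2]
      rw [PySem.Set.ofList_cons, List.filter_cons]
      by_cases hk : li ≤ ((c :: cs).count c : Int)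
      · rw [if_pos hk, if_pos (by simpa using hk), hsame]
      · rw [if_neg hk, if_neg (by simpa using hk), hsame]

-- B's recursion computes: distinct letters in first-occurrence order whose count reaches li
lemma pvGo_eq (li : Int) (l : List String) :
    pvGo li l = (PySem.Set.ofList l).filter (fun c => decide (li ≤ (l.count c : Int))) :=
  pvGo_eq_aux li l.length l (le_refl _)

-- ===== VERDICT (by name: the statement is the Claim_ definition above) =====
theorem wicej_niz_spec : Claim_equal_wicej_niz := by
  intro text li _
  unfold Spec_wicej_niz wicej_niz wicej_niz_alt
  simp only [setdefault_insert_eq_modify]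
  set tr := PySem.Str.replace text " " "" with htr
  -- lowering the whole string then splitting into 1-char strings = lowering each 1-char string
  have hletters : (PySem.Str.lower tr).toList.map (fun ch => String.ofList [ch])
      = tr.toList.map (fun ch => String.ofList [PySem.Chars.lowerChar ch]) := by
    simp [PySem.Str.lower, PySem.Chars.lower, List.map_map, Function.comp]
  rw [hletters]
  set L := tr.toList.map (fun ch => String.ofList [PySem.Chars.lowerChar ch]) with hL
  -- A's counting loop builds Counter(L)
  have h1 : tr.toList.foldl (fun (d : PySem.Dict String Int) ch =>
        d.modify (PySem.Str.lower (String.ofList [ch])) 0 (· + 1)) PySem.Dict.empty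
      = PySem.Dict.counter L := by
    rw [PySem.Dict.counter_eq_foldl, hL, List.foldl_map]
    apply PySem.List.foldl_congr_mem
    intro acc x _
    simp [PySem.Str.lower, PySem.Chars.lower]
  rw [h1, PySem.Dict.items_counter, List.foldl_map]
  -- A's filtering loop over the distinct letters appends exactly the qualifying ones
  rw [foldl_add_if_of_nodup (fun k => li ≤ (L.count k : Int)) _ _
      (PySem.Set.nodup_ofList L) (fun x _ => by simp [PySem.Set.contains, PySem.Set.empty])]
  -- B's side
  rw [pvGo_eq]
  have hnd : ((PySem.Set.ofList L).filter (fun c => decide (li ≤ (L.count c : Int)))).Nodup :=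
    (PySem.Set.nodup_ofList L).filter _
  rw [PySem.Set.ofList_eq_self_of_nodup _ hnd]
  simp [PySem.Set.empty, List.nil_append]
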